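-- pv_equiv track=rewrite | github.com/utkarsh0702/vedicpy | vedicpy/multiply.py | multiply_by_9group
-- ===== SOURCE A (Python) =====
-- def multiply_by_9group(a: int) -> int:
--     a= int(a)
--     i=1; m=a; b= a%10; c=10-b
--     a//=10
--     while(a!=0):
--         b= a%10; a//=10
--         c+= (9-b)*(10**i); i+=1
--
--     m= (m-1)*(10**i)
--     return (c+m)
-- ===== SOURCE B (Python) =====
-- def multiply_by_9group(a: int) -> int:
--     a = int(a)
--     # count digits of a with the same a//10 loop shape (diverges on negatives, like A)
--     i = 1
--     t = a // 10
--     while t != 0: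
--         t //= 10
--         i += 1
--     return a * (10 ** i - 1)
-- ===== Notes on version B (the rewrite author's own statement) =====
-- stated objective: simpler
-- what changed: B only counts the digits d of a and returns a*(10**d-1) in one closed-form multiply, instead of A's per-digit 10's-complement accumulation c += (9-b)*10**i combined with (m-1)*10**i.
import Mathlib
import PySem

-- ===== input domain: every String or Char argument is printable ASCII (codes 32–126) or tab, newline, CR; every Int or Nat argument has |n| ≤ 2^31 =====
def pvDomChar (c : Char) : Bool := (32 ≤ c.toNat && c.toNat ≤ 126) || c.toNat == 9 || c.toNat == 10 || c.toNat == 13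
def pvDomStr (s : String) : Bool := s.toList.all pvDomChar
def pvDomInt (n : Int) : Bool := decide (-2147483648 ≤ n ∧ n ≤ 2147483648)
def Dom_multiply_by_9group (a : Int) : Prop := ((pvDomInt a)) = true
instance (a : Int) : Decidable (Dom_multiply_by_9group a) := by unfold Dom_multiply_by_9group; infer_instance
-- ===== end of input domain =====

-- B counts the digits d of a and returns a*(10^d-1) in closed form, replacing A's per-digit
-- 10's-complement accumulation (objective: simpler). Pre_ excludes a < 0, where the Python A
-- (and B) loop forever because a //= 10 never reaches 0.


-- ===== PORT A =====
-- A's while loop: while a != 0: b = a%10; a //= 10; c += (9-b)*10^i; i += 1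
def pvLoopA (n : Nat) (i : Nat) (c : Int) : Nat × Int :=
  if h : n = 0 then (i, c)
  else pvLoopA (n / 10) (i + 1) (c + (9 - ((n % 10 : Nat) : Int)) * 10 ^ i)
  termination_by n
  decreasing_by exact Nat.div_lt_self (Nat.pos_of_ne_zero h) (by norm_num)

-- the 'if a < 0' guard only makes the port total: the Python loops forever there (outside Pre_)
def multiply_by_9group (a : Int) : Int :=
  if a < 0 then 0 else
    let m : Int := a
    let c : Int := 10 - ((a.toNat % 10 : Nat) : Int)
    let r := pvLoopA (a.toNat / 10) 1 c
    r.2 + (m - 1) * 10 ^ r.1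

-- ===== PORT B =====
-- B's digit-count loop: i = 1; t = a//10; while t != 0: t //= 10; i += 1
def pvLoopB (t : Nat) (i : Nat) : Nat :=
  if h : t = 0 then i
  else pvLoopB (t / 10) (i + 1)
  termination_by t
  decreasing_by exact Nat.div_lt_self (Nat.pos_of_ne_zero h) (by norm_num)

def multiply_by_9group_alt (a : Int) : Int :=
  if a < 0 then 0 else a * (10 ^ pvLoopB (a.toNat / 10) 1 - 1)

-- ===== PRECONDITION & SPEC =====
-- Pre_ excludes a < 0: there the Python A never returns (infinite loop, a //= 10 stalls at -1)
def Pre_multiply_by_9group (a : Int) : Prop := 0 ≤ a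
instance (a : Int) : Decidable (Pre_multiply_by_9group a) := by unfold Pre_multiply_by_9group; infer_instance
def pvWitness_multiply_by_9group : Int := (37)

def Spec_multiply_by_9group (a : Int) (out : Int) : Prop := out = multiply_by_9group_alt a
instance (a : Int) (out : Int) : Decidable (Spec_multiply_by_9group a out) := by unfold Spec_multiply_by_9group; infer_instance

-- ===== CLAIM (what is proved, stated in full; the proofs are below) =====
def Claim_equal_multiply_by_9group : Prop := ∀ (a : Int), Dom_multiply_by_9group a → Pre_multiply_by_9group a → Spec_multiply_by_9group a (multiply_by_9group a)

-- ===== LEMMAS AND PROOFS =====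

-- A's loop computes B's digit count together with the 10's-complement tail
theorem pvLoopA_eq (n i : Nat) (c : Int) :
    pvLoopA n i c = (pvLoopB n i, c + 10 ^ pvLoopB n i - 10 ^ i - (n : Int) * 10 ^ i) := by
  induction n using Nat.strong_induction_on generalizing i c with
  | _ n ih =>
    by_cases h : n = 0
    · subst h; rw [pvLoopA, pvLoopB]; simp
    · rw [pvLoopA, pvLoopB]
      simp only [h, dite_false]
      rw [ih (n / 10) (Nat.div_lt_self (Nat.pos_of_ne_zero h) (by norm_num))]
      have hmd : ((n % 10 : Nat) : Int) + 10 * ((n / 10 : Nat) : Int) = (n : Int) := by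
        push_cast; omega
      refine Prod.ext rfl ?_
      simp only
      linear_combination (-(10 ^ i : Int)) * hmd

-- ===== VERDICT (by name: the statement is the Claim_ definition above) =====
theorem multiply_by_9group_spec : Claim_equal_multiply_by_9group := by
  intro a _ hpre
  unfold Spec_multiply_by_9group multiply_by_9group multiply_by_9group_alt
  have hneg : ¬ a < 0 := not_lt.mpr hpre
  simp only [hneg, if_false]
  rw [pvLoopA_eq]
  have hmd : ((a.toNat % 10 : Nat) : Int) + 10 * ((a.toNat / 10 : Nat) : Int) = a := by
    push_cast; omega
  simp only
  linear_combination (-1 : Int) * hmd
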